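-- pv_equiv track=rewrite | github.com/Saoussen-CH/customer-support-mas-ai | tests/test_customer_support.py | validate_refund_workflow_gates
-- ===== SOURCE A (Python) =====
-- def validate_refund_workflow_gates(tool_calls, expected_gate_failure=None):
--     """
--     Validate that refund workflow validation gates work correctly.
--
--     Tests that the workflow properly stops at validation gates when failures occur:
--     - GATE 1: validate_order_id - order must exist
--     - GATE 2: check_refund_eligibility - order must be eligible
--     - GATE 3: process_refund - final processing step
--
--     Args:
--         tool_calls: List of tool calls made during conversation
--         expected_gate_failure: Expected gate where workflow should stop (1, 2, or None for success)
--
--     Returns: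
--         bool: True if workflow behaved correctly for the expected failure gate
--     """
--     tool_names = [call.get("name") for call in tool_calls]
--
--     # Extract refund workflow tool calls
--     gate_1_called = "validate_order_id" in tool_names
--     gate_2_called = "check_refund_eligibility" in tool_names
--     gate_3_called = "process_refund" in tool_names
--     workflow_called = "refund_workflow" in tool_names
--
--     if not workflow_called:
--         return False
--
--     # If no failure expected, all gates should be called
--     if expected_gate_failure is None:
--         return gate_1_called and gate_2_called and gate_3_called
--
--     # If gate 1 should fail, only gate 1 should be called
--     if expected_gate_failure == 1:
--         return gate_1_called and not gate_2_called and not gate_3_called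
--
--     # If gate 2 should fail, gates 1 and 2 should be called, but not gate 3
--     if expected_gate_failure == 2:
--         return gate_1_called and gate_2_called and not gate_3_called
--
--     return False
-- ===== SOURCE B (Python) =====
-- BITS = {"validate_order_id": 1, "check_refund_eligibility": 2,
--         "process_refund": 4, "refund_workflow": 8}
--
-- def validate_refund_workflow_gates(tool_calls, expected_gate_failure=None):
--     mask = 0
--     for call in tool_calls:
--         mask |= BITS.get(call.get("name"), 0)
--     if expected_gate_failure is None:
--         want = 7
--     elif expected_gate_failure == 1 or expected_gate_failure == 2:
--         want = 2 * expected_gate_failure - 1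
--     else:
--         return False
--     return mask >= 8 and mask - 8 == want
-- ===== Notes on version B (the rewrite author's own statement) =====
-- stated objective: alternative
-- what changed: Replaced four separate list-membership scans plus an if/elif boolean cascade by a single fold that ORs a per-tool bit code into an integer mask, then decides the result arithmetically (mask >= 8 and mask - 8 == want, with want = 7 or 2*k-1).
import Mathlib
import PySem

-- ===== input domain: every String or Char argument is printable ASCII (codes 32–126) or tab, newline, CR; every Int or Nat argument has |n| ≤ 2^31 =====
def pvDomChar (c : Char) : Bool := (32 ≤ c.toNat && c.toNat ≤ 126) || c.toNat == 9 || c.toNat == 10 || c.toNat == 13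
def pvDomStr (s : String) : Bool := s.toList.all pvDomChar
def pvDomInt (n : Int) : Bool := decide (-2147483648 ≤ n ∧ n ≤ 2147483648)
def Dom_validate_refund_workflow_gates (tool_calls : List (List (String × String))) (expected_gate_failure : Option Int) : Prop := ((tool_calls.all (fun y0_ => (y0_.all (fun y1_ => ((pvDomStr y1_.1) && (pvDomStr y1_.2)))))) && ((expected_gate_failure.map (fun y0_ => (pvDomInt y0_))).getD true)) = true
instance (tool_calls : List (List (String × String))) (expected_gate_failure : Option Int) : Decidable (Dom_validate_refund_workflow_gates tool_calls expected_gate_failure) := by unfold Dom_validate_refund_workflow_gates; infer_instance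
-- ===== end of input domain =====

-- B replaces A's four membership scans and if/elif cascade by one fold OR-ing a bit code
-- per call into an integer mask, checked arithmetically (mask >= 8, mask - 8 == want) (objective: alternative).

-- ===== PORT A =====
def validate_refund_workflow_gates (tool_calls : List (List (String × String))) (expected_gate_failure : Option Int) : Bool :=
  let tool_names : List (Option String) := tool_calls.map (fun call => (PySem.Dict.mk call).get? "name")
  let gate_1_called := tool_names.contains (some "validate_order_id")
  let gate_2_called := tool_names.contains (some "check_refund_eligibility")
  let gate_3_called := tool_names.contains (some "process_refund")
  let workflow_called := tool_names.contains (some "refund_workflow")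
  if !workflow_called then false
  else if expected_gate_failure = none then gate_1_called && gate_2_called && gate_3_called
  else if expected_gate_failure = some 1 then gate_1_called && !gate_2_called && !gate_3_called
  else if expected_gate_failure = some 2 then gate_1_called && gate_2_called && !gate_3_called
  else false

-- ===== PORT B =====
def pvBITS : PySem.Dict String Int :=
  PySem.Dict.ofList [("validate_order_id", 1), ("check_refund_eligibility", 2),
                     ("process_refund", 4), ("refund_workflow", 8)]

def validate_refund_workflow_gates_alt (tool_calls : List (List (String × String))) (expected_gate_failure : Option Int) : Bool :=
  let mask : Int := tool_calls.foldl (fun m call =>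
    -- BITS.get(call.get("name"), 0): call.get may yield None, which matches no string key
    PySem.Int.bor m (match (PySem.Dict.mk call).get? "name" with
                     | some n => pvBITS.getD n 0
                     | none => 0)) 0
  match expected_gate_failure with
  | none => decide (8 ≤ mask) && decide (mask - 8 = 7)
  | some k =>
    if k = 1 ∨ k = 2 then decide (8 ≤ mask) && decide (mask - 8 = 2 * k - 1)
    else false

-- ===== PRECONDITION & SPEC =====
def Spec_validate_refund_workflow_gates (tool_calls : List (List (String × String))) (expected_gate_failure : Option Int) (out : Bool) : Prop := out = validate_refund_workflow_gates_alt tool_calls expected_gate_failure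
instance (tool_calls : List (List (String × String))) (expected_gate_failure : Option Int) (out : Bool) : Decidable (Spec_validate_refund_workflow_gates tool_calls expected_gate_failure out) := by unfold Spec_validate_refund_workflow_gates; infer_instance

-- ===== CLAIM (what is proved, stated in full; the proofs are below) =====
def Claim_equal_validate_refund_workflow_gates : Prop := ∀ (tool_calls : List (List (String × String))) (expected_gate_failure : Option Int), Dom_validate_refund_workflow_gates tool_calls expected_gate_failure → Spec_validate_refund_workflow_gates tool_calls expected_gate_failure (validate_refund_workflow_gates tool_calls expected_gate_failure)

-- ===== LEMMAS AND PROOFS =====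
def pvName (call : List (String × String)) : Option String := (PySem.Dict.mk call).get? "name"

def pvBitOf (call : List (String × String)) : Int :=
  match pvName call with
  | some n => pvBITS.getD n 0
  | none => 0

def pvMaskOf (b1 b2 b3 b4 : Bool) : Int :=
  (if b1 then 1 else 0) + (if b2 then 2 else 0) + (if b3 then 4 else 0) + (if b4 then 8 else 0)

lemma pv_step (c : List (String × String)) (b1 b2 b3 b4 : Bool) :
    PySem.Int.bor (pvMaskOf b1 b2 b3 b4) (pvBitOf c)
      = pvMaskOf (b1 || (some "validate_order_id" == pvName c))
                 (b2 || (some "check_refund_eligibility" == pvName c))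
                 (b3 || (some "process_refund" == pvName c))
                 (b4 || (some "refund_workflow" == pvName c)) := by
  unfold pvBitOf
  rcases h : pvName c with _ | n
  · cases b1 <;> cases b2 <;> cases b3 <;> cases b4 <;> decide
  · by_cases h1 : n = "validate_order_id"
    · subst h1; cases b1 <;> cases b2 <;> cases b3 <;> cases b4 <;> decide
    · by_cases h2 : n = "check_refund_eligibility"
      · subst h2; cases b1 <;> cases b2 <;> cases b3 <;> cases b4 <;> decide
      · by_cases h3 : n = "process_refund"
        · subst h3; cases b1 <;> cases b2 <;> cases b3 <;> cases b4 <;> decide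
        · by_cases h4 : n = "refund_workflow"
          · subst h4; cases b1 <;> cases b2 <;> cases b3 <;> cases b4 <;> decide
          · have hz : pvBITS.getD n 0 = 0 := by
              show ((((PySem.Dict.empty.insert "validate_order_id" (1:Int)).insert
                  "check_refund_eligibility" 2).insert "process_refund" 4).insert
                  "refund_workflow" 8).getD n 0 = 0
              simp [PySem.Dict.getD_insert, PySem.Dict.getD_empty, h1, h2, h3, h4]
            simp only [hz]
            have h1' : ¬ "validate_order_id" = n := fun h => h1 h.symm
            have h2' : ¬ "check_refund_eligibility" = n := fun h => h2 h.symm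
            have h3' : ¬ "process_refund" = n := fun h => h3 h.symm
            have h4' : ¬ "refund_workflow" = n := fun h => h4 h.symm
            have hf : ∀ (a b : String), ¬ a = b → (a == b) = false :=
              fun a b hab => beq_eq_false_iff_ne.mpr hab
            simp [hf _ _ h1', hf _ _ h2', hf _ _ h3', hf _ _ h4']

lemma pv_fold (l : List (List (String × String))) : ∀ b1 b2 b3 b4 : Bool,
    l.foldl (fun m call => PySem.Int.bor m (pvBitOf call)) (pvMaskOf b1 b2 b3 b4)
      = pvMaskOf (b1 || (l.map pvName).contains (some "validate_order_id"))
                 (b2 || (l.map pvName).contains (some "check_refund_eligibility"))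
                 (b3 || (l.map pvName).contains (some "process_refund"))
                 (b4 || (l.map pvName).contains (some "refund_workflow")) := by
  induction l with
  | nil => intro b1 b2 b3 b4; simp
  | cons c l ih =>
    intro b1 b2 b3 b4
    simp only [List.foldl_cons, pv_step, ih, List.map_cons, List.contains_cons]
    congr 1 <;> rw [Bool.or_assoc]

lemma pv_final (b1 b2 b3 b4 : Bool) (eg : Option Int) :
    (if !b4 then false
     else if eg = none then b1 && b2 && b3
     else if eg = some 1 then b1 && !b2 && !b3
     else if eg = some 2 then b1 && b2 && !b3
     else false)
    = (let mask := pvMaskOf b1 b2 b3 b4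
       match eg with
       | none => decide (8 ≤ mask) && decide (mask - 8 = 7)
       | some k => if k = 1 ∨ k = 2 then decide (8 ≤ mask) && decide (mask - 8 = 2 * k - 1)
                   else false) := by
  rcases eg with _ | k
  · cases b1 <;> cases b2 <;> cases b3 <;> cases b4 <;> decide
  · by_cases h1 : k = 1
    · subst h1; cases b1 <;> cases b2 <;> cases b3 <;> cases b4 <;> decide
    · by_cases h2 : k = 2
      · subst h2; cases b1 <;> cases b2 <;> cases b3 <;> cases b4 <;> decide
      · simp [h1, h2]

-- ===== VERDICT (by name: the statement is the Claim_ definition above) =====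
theorem validate_refund_workflow_gates_spec : Claim_equal_validate_refund_workflow_gates := by
  intro tc eg _
  unfold Spec_validate_refund_workflow_gates validate_refund_workflow_gates validate_refund_workflow_gates_alt
  have hm : tc.foldl (fun m call =>
      PySem.Int.bor m (match (PySem.Dict.mk call).get? "name" with
                       | some n => pvBITS.getD n 0
                       | none => 0)) 0
      = pvMaskOf ((tc.map pvName).contains (some "validate_order_id"))
                 ((tc.map pvName).contains (some "check_refund_eligibility"))
                 ((tc.map pvName).contains (some "process_refund"))
                 ((tc.map pvName).contains (some "refund_workflow")) := by
    have h0 : (0 : Int) = pvMaskOf false false false false := by decide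
    rw [h0]
    simpa [pvBitOf] using pv_fold tc false false false false
  simp only [hm]
  exact pv_final _ _ _ _ eg
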